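-- pv_equiv track=rewrite | github.com/oran123412/git-with-github | python/via_teachers/Dor/workPageDor.py | most_common
-- ===== SOURCE A (Python) =====
-- def most_common(numbers):
--     count0=0
--     count1=0
--     count2=0
--     for i in numbers:
--         if i%3==0:
--             count0+=1
--         elif i%3==1:
--             count1+=1
--         elif i%3==2:
--             count2+=1
--     if count0>count1 and count0>count2:
--         return ('the most common is 0')
--     elif count1>count0 and count1>count2:
--         return ('the most common is 1')
--     elif count2>count1 and count2>count0:
--         return ('the most common is 2')
--     else:
--         return("tie between some groups")
-- ===== SOURCE B (Python) =====
-- def most_common(numbers):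
--     runs = []
--     for r in sorted(i % 3 for i in numbers):
--         if runs and runs[-1][0] == r:
--             runs[-1] = (r, runs[-1][1] + 1)
--         else:
--             runs.append((r, 1))
--     best = [(v, L) for v, L in runs if all(L > M for u, M in runs if u != v)]
--     if len(best) == 1:
--         return 'the most common is %d' % best[0][0]
--     return "tie between some groups"
-- ===== Notes on version B (the rewrite author's own statement) =====
-- stated objective: alternative
-- what changed: B sorts the mod-3 remainders and scans the sorted list into runs (groupby-style), then picks the run strictly longer than all other runs, instead of A's one-pass three-counter tally with a pairwise-comparison ladder.
import Mathlib
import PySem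

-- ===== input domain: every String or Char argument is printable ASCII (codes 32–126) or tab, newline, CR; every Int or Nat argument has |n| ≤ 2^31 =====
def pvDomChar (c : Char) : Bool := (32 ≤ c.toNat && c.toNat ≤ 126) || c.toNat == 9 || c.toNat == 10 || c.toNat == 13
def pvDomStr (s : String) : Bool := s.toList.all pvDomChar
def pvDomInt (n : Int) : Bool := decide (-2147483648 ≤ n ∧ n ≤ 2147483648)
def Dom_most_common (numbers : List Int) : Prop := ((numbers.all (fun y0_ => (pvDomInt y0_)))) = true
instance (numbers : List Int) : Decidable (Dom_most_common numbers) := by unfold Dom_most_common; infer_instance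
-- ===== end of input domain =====

-- B sorts the mod-3 remainders and scans them into runs, then picks the run strictly
-- longer than every other run — an alternative (sort-then-group) algorithm, same result.

-- ===== PORT A =====
def most_common (numbers : List Int) : String :=
  let cs := numbers.foldl (fun (acc : Int × Int × Int) i =>
      if PySem.Int.mod i 3 = 0 then (acc.1 + 1, acc.2.1, acc.2.2)
      else if PySem.Int.mod i 3 = 1 then (acc.1, acc.2.1 + 1, acc.2.2)
      else if PySem.Int.mod i 3 = 2 then (acc.1, acc.2.1, acc.2.2 + 1)
      else acc) (0, 0, 0)
  if cs.1 > cs.2.1 ∧ cs.1 > cs.2.2 then "the most common is 0"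
  else if cs.2.1 > cs.1 ∧ cs.2.1 > cs.2.2 then "the most common is 1"
  else if cs.2.2 > cs.2.1 ∧ cs.2.2 > cs.1 then "the most common is 2"
  else "tie between some groups"

-- ===== PORT B =====
-- one step of B's run-building scan over the sorted remainders (runs[-1] update / append)
def mcRunStep (runs : List (Int × Int)) (r : Int) : List (Int × Int) :=
  match runs.getLast? with
  | some last => if last.1 = r then runs.dropLast ++ [(r, last.2 + 1)] else runs ++ [(r, 1)]
  | none => runs ++ [(r, 1)]

def most_common_alt (numbers : List Int) : String :=
  let runs := (PySem.List.sorted (numbers.map (fun i => PySem.Int.mod i 3)) (fun x => x) false).foldl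
      mcRunStep []
  let best := runs.filter (fun p =>
      (runs.filter (fun q => !(q.1 == p.1))).all (fun q => decide (q.2 < p.2)))
  match best with
  | [p] => "the most common is " ++ PySem.Int.toStr p.1
  | _ => "tie between some groups"

-- ===== PRECONDITION & SPEC =====
def Spec_most_common (numbers : List Int) (out : String) : Prop := out = most_common_alt numbers
instance (numbers : List Int) (out : String) : Decidable (Spec_most_common numbers out) := by unfold Spec_most_common; infer_instance

-- ===== CLAIM (what is proved, stated in full; the proofs are below) =====
def Claim_equal_most_common : Prop := ∀ (numbers : List Int), Dom_most_common numbers → Spec_most_common numbers (most_common numbers)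

-- ===== LEMMAS AND PROOFS =====

lemma loopA_eq_counts (ns : List Int) (c0 c1 c2 : Int) :
    ns.foldl (fun (acc : Int × Int × Int) i =>
      if PySem.Int.mod i 3 = 0 then (acc.1 + 1, acc.2.1, acc.2.2)
      else if PySem.Int.mod i 3 = 1 then (acc.1, acc.2.1 + 1, acc.2.2)
      else if PySem.Int.mod i 3 = 2 then (acc.1, acc.2.1, acc.2.2 + 1)
      else acc) (c0, c1, c2)
    = (c0 + ((ns.map (fun i => PySem.Int.mod i 3)).count 0 : Int),
       c1 + ((ns.map (fun i => PySem.Int.mod i 3)).count 1 : Int),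
       c2 + ((ns.map (fun i => PySem.Int.mod i 3)).count 2 : Int)) := by
  induction ns generalizing c0 c1 c2 with
  | nil => simp
  | cons i ns ih =>
    have h0 : (0 : Int) ≤ PySem.Int.mod i 3 := PySem.Int.mod_nonneg i (by omega)
    have h3 : PySem.Int.mod i 3 < 3 := PySem.Int.mod_lt i (by omega)
    have hc : PySem.Int.mod i 3 = 0 ∨ PySem.Int.mod i 3 = 1 ∨ PySem.Int.mod i 3 = 2 := by omega
    rcases hc with h | h | h
    · rw [List.map_cons, List.foldl_cons, h, if_pos rfl, ih]
      simp only [List.count_cons, Prod.ext_iff]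
      norm_num
      omega
    · rw [List.map_cons, List.foldl_cons, h, if_neg (by decide), if_pos rfl, ih]
      simp only [List.count_cons, Prod.ext_iff]
      norm_num
      omega
    · rw [List.map_cons, List.foldl_cons, h, if_neg (by decide), if_neg (by decide),
        if_pos rfl, ih]
      simp only [List.count_cons, Prod.ext_iff]
      norm_num
      omega

-- the sorted remainder list is three replicate blocks
lemma sorted_rem_eq (l : List Int) (hl : ∀ x ∈ l, x = 0 ∨ x = 1 ∨ x = 2) :
    PySem.List.sorted l (fun x => x) false
      = List.replicate (l.count 0) 0 ++ List.replicate (l.count 1) 1 ++ List.replicate (l.count 2) 2 := by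
  apply PySem.List.sorted_id_eq_of_perm_of_pairwise
  · rw [List.perm_iff_count]
    intro v
    by_cases h0 : v = 0
    · subst h0; simp [List.count_append, List.count_replicate]
    · by_cases h1 : v = 1
      · subst h1; simp [List.count_append, List.count_replicate]
      · by_cases h2 : v = 2
        · subst h2; simp [List.count_append, List.count_replicate]
        · have : l.count v = 0 := by
            rw [List.count_eq_zero]
            intro hv
            rcases hl v hv with h | h | h <;> simp_all
          simp only [List.count_append, List.count_replicate, beq_iff_eq, this]
          split_ifs <;> omega
  · rw [List.pairwise_append]
    refine ⟨?_, List.pairwise_replicate.mpr (by simp), ?_⟩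
    · rw [List.pairwise_append]
      refine ⟨List.pairwise_replicate.mpr (by simp), List.pairwise_replicate.mpr (by simp), ?_⟩
      intro a ha b hb
      rw [List.eq_of_mem_replicate ha, List.eq_of_mem_replicate hb]; decide
    · intro a ha b hb
      rw [List.eq_of_mem_replicate hb]
      rcases List.mem_append.mp ha with h | h <;>
        rw [List.eq_of_mem_replicate h] <;> decide

-- extending the current run
lemma runFold_extend (n : Nat) (acc : List (Int × Int)) (v : Int) (k : Int) :
    (List.replicate n v).foldl mcRunStep (acc ++ [(v, k)]) = acc ++ [(v, k + n)] := by
  induction n generalizing k with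
  | zero => simp
  | succ m ih =>
    rw [List.replicate_succ, List.foldl_cons]
    have : mcRunStep (acc ++ [(v, k)]) v = acc ++ [(v, k + 1)] := by
      simp [mcRunStep]
    rw [this, ih]
    rw [show ((m + 1 : Nat) : Int) = (m : Int) + 1 by push_cast; ring]
    rw [show k + 1 + (m : Int) = k + ((m : Int) + 1) by ring]

-- starting a new run: acc's last value (if any) differs from v
lemma runFold_block (n : Nat) (acc : List (Int × Int)) (v : Int)
    (hne : ∀ p ∈ acc.getLast?, p.1 ≠ v) :
    (List.replicate n v).foldl mcRunStep acc
      = acc ++ (if n = 0 then [] else [(v, (n : Int))]) := by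
  cases n with
  | zero => simp
  | succ m =>
    rw [List.replicate_succ, List.foldl_cons]
    have hstep : mcRunStep acc v = acc ++ [(v, 1)] := by
      unfold mcRunStep
      cases h : acc.getLast? with
      | none => rfl
      | some p => simp [hne p (by simp [h])]
    rw [hstep, runFold_extend]
    rw [if_neg (Nat.succ_ne_zero m)]
    rw [show ((m + 1 : Nat) : Int) = 1 + (m : Int) by push_cast; ring]

-- B's runs, computed from the three counts
lemma runs_eq (a b c : Nat) :
    ((List.replicate a 0 ++ List.replicate b 1 ++ List.replicate c 2) : List Int).foldl mcRunStep []
      = (if a = 0 then [] else [((0 : Int), (a : Int))])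
        ++ (if b = 0 then [] else [((1 : Int), (b : Int))])
        ++ (if c = 0 then [] else [((2 : Int), (c : Int))]) := by
  rw [List.foldl_append, List.foldl_append]
  rw [runFold_block a [] 0 (by simp)]
  rw [runFold_block b _ 1 (by
    intro p hp
    split_ifs at hp <;> simp_all <;> (cases hp; simp))]
  rw [runFold_block c _ 2 (by
    intro p hp
    split_ifs at hp <;> simp_all <;> (cases hp; simp))]
  simp

theorem most_common_spec : Claim_equal_most_common := by
  intro numbers _
  unfold Spec_most_common most_common most_common_alt
  have hmem : ∀ x ∈ numbers.map (fun i => PySem.Int.mod i 3), x = 0 ∨ x = 1 ∨ x = 2 := by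
    intro x hx
    rcases List.mem_map.mp hx with ⟨i, _, rfl⟩
    have h0 : (0 : Int) ≤ PySem.Int.mod i 3 := PySem.Int.mod_nonneg i (by omega)
    have h3 : PySem.Int.mod i 3 < 3 := PySem.Int.mod_lt i (by omega)
    omega
  rw [loopA_eq_counts, sorted_rem_eq _ hmem, runs_eq]
  set a := (numbers.map (fun i => PySem.Int.mod i 3)).count 0 with ha
  set b := (numbers.map (fun i => PySem.Int.mod i 3)).count 1 with hb
  set c := (numbers.map (fun i => PySem.Int.mod i 3)).count 2 with hc
  clear ha hb hc hmem
  by_cases haz : a = 0 <;> by_cases hbz : b = 0 <;> by_cases hcz : c = 0 <;>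
  by_cases h1 : a < b <;> by_cases h2 : b < a <;> by_cases h3 : b < c <;>
  by_cases h4 : c < b <;> by_cases h5 : a < c <;> by_cases h6 : c < a <;>
    first
    | omega
    | (simp [haz, hbz, hcz, h1, h2, h3, h4, h5, h6, List.filter, List.all] <;>
        (try simp_all) <;> rfl)
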